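-- pv_equiv track=rewrite | github.com/Dev-Rayyan-Ahmed/CIS-Comm-Logic-Forge-PSET3 | challenge02_emergency_evacuation.py | solve_simulation
-- ===== SOURCE A (Python) =====
-- def solve_simulation(N, Q, limit, weights, priority, queries):
--     #pairing data together
--     people = []
--     for i in range(N):
--         people.append({'w': weights[i], 'p': priority[i]})
--
--     #sorting by weight
--     people.sort(key=lambda x: x['w'])
--
--     boats = 0
--     #copying list for simulation
--     remaining = list(people)
--
--     #  processing people until none left
--     while remaining:
--         boats += 1
--         #taking the heaviest person
--         heaviest = remaining.pop()
--
--         if not remaining: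
--             break
--
--         #finding the lightest person
--         lightest = remaining[0]
--
--         # checking constraints
--         w_sum = heaviest['w'] + lightest['w']
--         p_conflict = (heaviest['p'] == 1 and lightest['p'] == 1)
--
--         if w_sum <= limit and not p_conflict:
--             #removing the paired person
--             remaining.pop(0)
--
--     results = []
--     # answering queries
--     for q in queries:
--         parts = q.split()
--
--         if parts[0] == "CANPAIR":
--             x, y = int(parts[1]), int(parts[2])
--             val_w = weights[x] + weights[y]
--             #checking priority conflict
--             conflict = (priority[x] == 1 and priority[y] == 1)
--
--             if val_w <= limit and not conflict:
--                 results.append("Yes")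
--             else:
--                 results.append("No")
--
--         elif parts[0] == "REMAINING":
--             B = int(parts[1])
--             #calculating max pairs possible
--             max_pairs = N - boats
--
--             if B <= max_pairs:
--                 evacuated = B * 2
--             else:
--                 #taking all pairs plus singles
--                 evacuated = max_pairs * 2
--                 leftover_boats = B - max_pairs
--                 leftover_people = N - evacuated
--                 evacuated += min(leftover_boats, leftover_people)
--
--             results.append(str(N - evacuated))
--
--     return boats, results
-- ===== SOURCE B (Python) =====
-- def solve_simulation(N, Q, limit, weights, priority, queries):
--     # two pointers over the weight-sorted people instead of repeated pop(0)/pop();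
--     # queries are parsed into a tagged form once, then evaluated
--     ppl = sorted(((weights[i], priority[i]) for i in range(N)), key=lambda t: t[0])
--     boats = 0
--     lo, hi = 0, len(ppl) - 1
--     while lo <= hi:
--         boats += 1
--         if lo < hi:
--             lw, lp = ppl[lo]
--             hw, hp = ppl[hi]
--             if lw + hw <= limit and not (hp == 1 and lp == 1):
--                 lo += 1
--         hi -= 1
--     parsed = [p for p in map(_parse, queries) if p is not None]
--     results = [_eval(p, N, limit, weights, priority, boats) for p in parsed]
--     return boats, results
--
-- def _parse(q):
--     parts = q.split()
--     if parts[0] == "CANPAIR":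
--         return ("C", int(parts[1]), int(parts[2]))
--     if parts[0] == "REMAINING":
--         return ("R", int(parts[1]), 0)
--     return None
--
-- def _eval(p, N, limit, weights, priority, boats):
--     kind, a, b = p
--     if kind == "C":
--         ok = weights[a] + weights[b] <= limit and not (priority[a] == 1 and priority[b] == 1)
--         return "Yes" if ok else "No"
--     m = N - boats
--     if a <= m:
--         return str(N - 2 * a)
--     return str(max(N - m - a, 0))
-- ===== Notes on version B (the rewrite author's own statement) =====
-- stated objective: alternative
-- what changed: The boat-pairing simulation walks two index pointers inward over the weight-sorted list instead of repeatedly popping the list's head (pop(0)) and tail, and queries are answered in two staged passes - parse each query into a tagged triple, then evaluate it with a closed-form max() formula for REMAINING - instead of A's single branching loop that appends to an accumulator.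
import Mathlib
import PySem

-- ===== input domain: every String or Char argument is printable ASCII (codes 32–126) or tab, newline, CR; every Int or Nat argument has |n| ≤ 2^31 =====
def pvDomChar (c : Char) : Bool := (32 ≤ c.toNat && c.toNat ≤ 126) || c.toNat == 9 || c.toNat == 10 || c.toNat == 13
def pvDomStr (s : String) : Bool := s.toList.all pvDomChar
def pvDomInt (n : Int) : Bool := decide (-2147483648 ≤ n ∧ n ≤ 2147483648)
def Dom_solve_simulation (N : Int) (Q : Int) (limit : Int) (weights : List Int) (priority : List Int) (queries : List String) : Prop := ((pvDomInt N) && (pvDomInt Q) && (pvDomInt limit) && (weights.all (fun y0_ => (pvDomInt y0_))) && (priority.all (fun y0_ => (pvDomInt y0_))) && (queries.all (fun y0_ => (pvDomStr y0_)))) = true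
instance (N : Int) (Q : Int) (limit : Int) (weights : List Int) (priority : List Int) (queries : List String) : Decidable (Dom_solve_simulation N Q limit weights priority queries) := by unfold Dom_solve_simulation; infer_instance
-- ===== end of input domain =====

-- B replaces A's pop()/pop(0) evacuation simulation by two index pointers over the
-- weight-sorted list, and answers queries in two staged passes (parse into a tagged
-- triple, then evaluate with a closed-form REMAINING formula) instead of A's
-- single accumulating loop.

-- ===== PORT A =====
-- the 'while remaining:' simulation loop: pop last (heaviest), peek first (lightest),
-- pop first on a successful pairing.  getLastD/headD defaults are never read: the
-- branches guard rem ≠ [] / rest ≠ [] exactly as the Python does.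
def evacLoopA (limit : Int) (rem : List (Int × Int)) (boats : Int) : Int :=
  if h : rem = [] then boats
  else
    let heaviest := rem.getLastD (0, 0)
    let rest := rem.dropLast
    if rest = [] then boats + 1
    else
      let lightest := rest.headD (0, 0)
      if heaviest.1 + lightest.1 ≤ limit ∧ ¬(heaviest.2 = 1 ∧ lightest.2 = 1) then
        evacLoopA limit rest.tail (boats + 1)
      else
        evacLoopA limit rest (boats + 1)
termination_by rem.length
decreasing_by
  · have := List.length_pos_iff.mpr h
    simp [List.length_tail, List.length_dropLast]; omega
  · have := List.length_pos_iff.mpr h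
    simp [List.length_dropLast]; omega

-- one iteration of A's query loop (appends to the accumulated results list);
-- pyGetD/getD/ofStr? defaults stand where Python would raise — excluded by Pre_.
def stepQA (N limit : Int) (weights priority : List Int) (boats : Int)
    (acc : List String) (q : String) : List String :=
  let parts := PySem.Str.split₀ q
  if parts.headD "" = "CANPAIR" then
    let x := (PySem.Int.ofStr? (parts.getD 1 "")).getD 0
    let y := (PySem.Int.ofStr? (parts.getD 2 "")).getD 0
    let val_w := PySem.List.pyGetD weights x 0 + PySem.List.pyGetD weights y 0
    if val_w ≤ limit ∧ ¬(PySem.List.pyGetD priority x 0 = 1 ∧ PySem.List.pyGetD priority y 0 = 1) then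
      acc ++ ["Yes"]
    else
      acc ++ ["No"]
  else if parts.headD "" = "REMAINING" then
    let B := (PySem.Int.ofStr? (parts.getD 1 "")).getD 0
    let max_pairs := N - boats
    if B ≤ max_pairs then
      acc ++ [PySem.Int.toStr (N - B * 2)]
    else
      let evacuated := max_pairs * 2 + min (B - max_pairs) (N - max_pairs * 2)
      acc ++ [PySem.Int.toStr (N - evacuated)]
  else acc

def solve_simulation (N : Int) (Q : Int) (limit : Int) (weights : List Int) (priority : List Int) (queries : List String) : Int × List String :=
  let people := (PySem.List.pyRange 0 N 1).map
    (fun i => (PySem.List.pyGetD weights i 0, PySem.List.pyGetD priority i 0))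
  let people := PySem.List.sorted people (fun x => x.1) false
  let boats := evacLoopA limit people 0
  let results := queries.foldl (stepQA N limit weights priority boats) []
  (boats, results)

-- ===== PORT B =====
-- the two-pointer loop: while lo <= hi: boats += 1; on a successful pairing lo += 1; always hi -= 1
def evacLoopB (limit : Int) (ppl : List (Int × Int)) (lo hi boats : Int) : Int :=
  if hij : lo ≤ hi then
    if lo < hi ∧
        (PySem.List.pyGetD ppl lo (0, 0)).1 + (PySem.List.pyGetD ppl hi (0, 0)).1 ≤ limit ∧
        ¬((PySem.List.pyGetD ppl hi (0, 0)).2 = 1 ∧ (PySem.List.pyGetD ppl lo (0, 0)).2 = 1) then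
      evacLoopB limit ppl (lo + 1) (hi - 1) (boats + 1)
    else
      evacLoopB limit ppl lo (hi - 1) (boats + 1)
  else boats
termination_by (hi + 1 - lo).toNat
decreasing_by
  · omega
  · omega

-- B's _parse: a query becomes a tagged triple ("C", x, y) / ("R", b, 0), or None
def parseQB (q : String) : Option (String × Int × Int) :=
  let parts := PySem.Str.split₀ q
  if parts.headD "" = "CANPAIR" then
    some ("C", (PySem.Int.ofStr? (parts.getD 1 "")).getD 0,
               (PySem.Int.ofStr? (parts.getD 2 "")).getD 0)
  else if parts.headD "" = "REMAINING" then
    some ("R", (PySem.Int.ofStr? (parts.getD 1 "")).getD 0, 0)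
  else none

-- B's _eval: answer one parsed query
def evalQB (N limit : Int) (weights priority : List Int) (boats : Int)
    (p : String × Int × Int) : String :=
  if p.1 = "C" then
    if PySem.List.pyGetD weights p.2.1 0 + PySem.List.pyGetD weights p.2.2 0 ≤ limit ∧
        ¬(PySem.List.pyGetD priority p.2.1 0 = 1 ∧ PySem.List.pyGetD priority p.2.2 0 = 1) then
      "Yes"
    else "No"
  else
    let m := N - boats
    if p.2.1 ≤ m then PySem.Int.toStr (N - 2 * p.2.1)
    else PySem.Int.toStr (max (N - m - p.2.1) 0)

def solve_simulation_alt (N : Int) (Q : Int) (limit : Int) (weights : List Int) (priority : List Int) (queries : List String) : Int × List String :=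
  let ppl := PySem.List.sorted
    ((PySem.List.pyRange 0 N 1).map
      (fun i => (PySem.List.pyGetD weights i 0, PySem.List.pyGetD priority i 0)))
    (fun t => t.1) false
  let boats := evacLoopB limit ppl 0 ((PySem.List.len ppl) - 1) 0
  -- parsed = [p for p in map(_parse, queries) if p is not None]; results = [_eval(p,…) for p in parsed]
  let parsed := queries.filterMap parseQB
  let results := parsed.map (evalQB N limit weights priority boats)
  (boats, results)

-- ===== PRECONDITION & SPEC =====
-- one query is processed by A without raising: non-empty after split;
-- CANPAIR needs three tokens, two int-parsable, both indices in range of both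
-- lists; REMAINING needs two tokens with an int-parsable second.
def queryOK (weights priority : List Int) (q : String) : Bool :=
  let parts := PySem.Str.split₀ q
  !parts.isEmpty &&
  (if parts.headD "" = "CANPAIR" then
    decide (3 ≤ parts.length) &&
    (PySem.Int.ofStr? (parts.getD 1 "")).isSome &&
    (PySem.Int.ofStr? (parts.getD 2 "")).isSome &&
    decide (PySem.Raise.InRange weights.length ((PySem.Int.ofStr? (parts.getD 1 "")).getD 0)) &&
    decide (PySem.Raise.InRange weights.length ((PySem.Int.ofStr? (parts.getD 2 "")).getD 0)) &&
    decide (PySem.Raise.InRange priority.length ((PySem.Int.ofStr? (parts.getD 1 "")).getD 0)) &&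
    decide (PySem.Raise.InRange priority.length ((PySem.Int.ofStr? (parts.getD 2 "")).getD 0))
  else if parts.headD "" = "REMAINING" then
    decide (2 ≤ parts.length) && (PySem.Int.ofStr? (parts.getD 1 "")).isSome
  else true)

-- exactly the inputs on which Python A returns normally: weights/priority long
-- enough for the range(N) pairing loop, and every query well-formed as above.
def Pre_solve_simulation (N : Int) (Q : Int) (limit : Int) (weights : List Int) (priority : List Int) (queries : List String) : Prop :=
  N ≤ (weights.length : Int) ∧ N ≤ (priority.length : Int) ∧
  ∀ q ∈ queries, queryOK weights priority q = true

instance (N : Int) (Q : Int) (limit : Int) (weights : List Int) (priority : List Int) (queries : List String) : Decidable (Pre_solve_simulation N Q limit weights priority queries) := by unfold Pre_solve_simulation; infer_instance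

def pvWitness_solve_simulation : Int × Int × Int × List Int × List Int × List String :=
  (3, 2, 10, [3, 7, 4], [1, 0, 1], ["CANPAIR 0 2", "REMAINING 1"])

def Spec_solve_simulation (N : Int) (Q : Int) (limit : Int) (weights : List Int) (priority : List Int) (queries : List String) (out : Int × List String) : Prop := out = solve_simulation_alt N Q limit weights priority queries
instance (N : Int) (Q : Int) (limit : Int) (weights : List Int) (priority : List Int) (queries : List String) (out : Int × List String) : Decidable (Spec_solve_simulation N Q limit weights priority queries out) := by unfold Spec_solve_simulation; infer_instance

-- ===== CLAIM (what is proved, stated in full; the proofs are below) =====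
def Claim_equal_solve_simulation : Prop := ∀ (N : Int) (Q : Int) (limit : Int) (weights : List Int) (priority : List Int) (queries : List String), Dom_solve_simulation N Q limit weights priority queries → Pre_solve_simulation N Q limit weights priority queries → Spec_solve_simulation N Q limit weights priority queries (solve_simulation N Q limit weights priority queries)

-- ===== LEMMAS AND PROOFS =====

theorem pvWitness_ok :
    Dom_solve_simulation (pvWitness_solve_simulation.1) (pvWitness_solve_simulation.2.1) (pvWitness_solve_simulation.2.2.1) (pvWitness_solve_simulation.2.2.2.1) (pvWitness_solve_simulation.2.2.2.2.1) (pvWitness_solve_simulation.2.2.2.2.2) ∧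
    Pre_solve_simulation (pvWitness_solve_simulation.1) (pvWitness_solve_simulation.2.1) (pvWitness_solve_simulation.2.2.1) (pvWitness_solve_simulation.2.2.2.1) (pvWitness_solve_simulation.2.2.2.2.1) (pvWitness_solve_simulation.2.2.2.2.2) := by
  decide

-- both loops compute the same boat count: evacLoopB on pointers (a, b-1) is
-- evacLoopA on the segment arr[a:b]
theorem seg_getElem (arr : List (Int × Int)) (a b i : Nat) (hb : b ≤ arr.length)
    (hi : a + i < b) : ((arr.drop a).take (b - a))[i]'(by
      simp [List.length_take, List.length_drop]; omega) = arr[a + i]'(by omega) := by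
  simp [List.getElem_take, List.getElem_drop]

theorem loop_eq (limit : Int) (arr : List (Int × Int)) :
    ∀ (k a b : Nat), b - a ≤ k → b ≤ arr.length → ∀ boats : Int,
      evacLoopA limit ((arr.drop a).take (b - a)) boats
        = evacLoopB limit arr (a : Int) ((b : Int) - 1) boats := by
  intro k
  induction k with
  | zero =>
    intro a b hk hb boats
    have hba : b ≤ a := by omega
    rw [evacLoopA, evacLoopB]
    simp [Nat.sub_eq_zero_of_le hba]
    omega
  | succ k ih =>
    intro a b hk hb boats
    by_cases hab : a < b
    · -- segment nonempty
      have hslen : ((arr.drop a).take (b - a)).length = b - a := by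
        simp [List.length_take, List.length_drop]; omega
      have hsne : (arr.drop a).take (b - a) ≠ [] := by
        intro h; rw [h] at hslen; simp at hslen; omega
      have hb1 : b - 1 < arr.length := by omega
      have hlast : ((arr.drop a).take (b - a)).getLastD (0, 0) = (arr[b - 1]'hb1) := by
        rw [List.getLastD_eq_getLast?, List.getLast?_eq_getElem?]
        rw [hslen]
        rw [List.getElem?_eq_getElem (by omega : b - a - 1 < ((arr.drop a).take (b - a)).length)]
        simp only [Option.getD_some]
        rw [seg_getElem arr a b (b - a - 1) hb (by omega)]
        congr 1; omega
      have hdrop : ((arr.drop a).take (b - a)).dropLast = (arr.drop a).take (b - 1 - a) := by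
        rw [List.dropLast_eq_take, hslen, List.take_take]
        congr 1; omega
      rw [evacLoopA]
      simp only [dif_neg hsne, hlast, hdrop]
      by_cases hone : b = a + 1
      · -- single person: one boat, loop ends
        have : (arr.drop a).take (b - 1 - a) = [] := by simp [hone]
        rw [if_pos this, evacLoopB]
        have hij : (a : Int) ≤ (b : Int) - 1 := by omega
        rw [dif_pos hij, if_neg (by omega), evacLoopB]
        rw [dif_neg (by omega)]
      · have hb1 : b - 1 < arr.length := by omega
        have ha1 : a < arr.length := by omega
        have hrestne : (arr.drop a).take (b - 1 - a) ≠ [] := by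
          intro h
          have := congrArg List.length h
          simp [List.length_take, List.length_drop] at this; omega
        rw [if_neg hrestne]
        have hhead : ((arr.drop a).take (b - 1 - a)).headD (0, 0) = (arr[a]'ha1) := by
          rw [List.headD_eq_head?, List.head?_eq_getElem?]
          rw [List.getElem?_eq_getElem (by simp [List.length_take, List.length_drop]; omega : 0 < ((arr.drop a).take (b - 1 - a)).length)]
          simp only [Option.getD_some]
          have h0 := seg_getElem arr a (b - 1) 0 (by omega) (by omega)
          simpa using h0
        rw [hhead]
        -- B side values
        have hgi : PySem.List.pyGetD arr (a : Int) (0, 0) = (arr[a]'ha1) := by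
          rw [PySem.List.pyGetD_natCast]
          exact List.getD_eq_getElem _ _ (by omega)
        have hgj : PySem.List.pyGetD arr ((b : Int) - 1) (0, 0) = (arr[b - 1]'hb1) := by
          have hcast : ((b : Int) - 1) = ((b - 1 : Nat) : Int) := by omega
          rw [hcast, PySem.List.pyGetD_natCast]
          exact List.getD_eq_getElem _ _ (by omega)
        rw [evacLoopB, dif_pos (by omega : (a : Int) ≤ (b : Int) - 1)]
        have htail : ((arr.drop a).take (b - 1 - a)).tail = (arr.drop (a + 1)).take (b - 1 - (a + 1)) := by
          rw [← List.drop_one, List.drop_take, List.drop_drop,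
            (by omega : b - 1 - a - 1 = b - 1 - (a + 1))]
        by_cases hcond : (arr[b - 1]'hb1).1 + (arr[a]'ha1).1 ≤ limit ∧
            ¬((arr[b - 1]'hb1).2 = 1 ∧ (arr[a]'ha1).2 = 1)
        · rw [if_pos hcond, if_pos (by
            refine ⟨by omega, ?_, ?_⟩
            · rw [hgi, hgj]; omega
            · rw [hgi, hgj]; exact hcond.2)]
          rw [htail]
          have := ih (a + 1) (b - 1) (by omega) (by omega) (boats + 1)
          rw [this]
          congr 1 <;> omega
        · rw [if_neg hcond, if_neg (by
            rw [hgi, hgj]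
            intro ⟨h1, h2, h3⟩
            exact hcond ⟨by omega, h3⟩)]
          have := ih a (b - 1) (by omega) (by omega) (boats + 1)
          rw [this]
          congr 1 <;> omega
    · -- empty segment
      have hba : b ≤ a := by omega
      rw [evacLoopA, evacLoopB]
      simp [Nat.sub_eq_zero_of_le hba]
      omega

-- one query step of A appends exactly B's parse-then-eval answer
theorem step_eq (N limit : Int) (weights priority : List Int) (boats : Int)
    (acc : List String) (q : String) :
    stepQA N limit weights priority boats acc q
      = acc ++ ((parseQB q).map (evalQB N limit weights priority boats)).toList := by
  unfold stepQA parseQB evalQB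
  generalize PySem.Str.split₀ q = parts
  simp only []
  split_ifs with h1 h2 h3 h4 <;> simp_all
  · -- REMAINING, B ≤ max_pairs: N - B*2 = N - 2*B
    congr 1; ring
  · -- REMAINING, B > max_pairs: A's min-arithmetic equals B's closed-form max
    rw [if_neg (by omega)]; congr 1; omega

theorem fold_eq (N limit : Int) (weights priority : List Int) (boats : Int)
    (qs : List String) (acc : List String) :
    qs.foldl (stepQA N limit weights priority boats) acc
      = acc ++ (qs.filterMap parseQB).map (evalQB N limit weights priority boats) := by
  induction qs generalizing acc with
  | nil => simp
  | cons q qs ih =>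
    simp only [List.foldl_cons, List.filterMap_cons, ih, step_eq]
    cases parseQB q <;> simp

-- ===== VERDICT (by name: the statement is the Claim_ definition above) =====
theorem solve_simulation_spec : Claim_equal_solve_simulation := by
  intro N Q limit weights priority queries _ _
  unfold Spec_solve_simulation solve_simulation solve_simulation_alt
  have hboats :
      evacLoopA limit (PySem.List.sorted ((PySem.List.pyRange 0 N 1).map
          (fun i => (PySem.List.pyGetD weights i 0, PySem.List.pyGetD priority i 0)))
          (fun x => x.1) false) 0
        = evacLoopB limit (PySem.List.sorted ((PySem.List.pyRange 0 N 1).map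
          (fun i => (PySem.List.pyGetD weights i 0, PySem.List.pyGetD priority i 0)))
          (fun t => t.1) false) 0
          ((PySem.List.len (PySem.List.sorted ((PySem.List.pyRange 0 N 1).map
          (fun i => (PySem.List.pyGetD weights i 0, PySem.List.pyGetD priority i 0)))
          (fun t => t.1) false)) - 1) 0 := by
    set arr := PySem.List.sorted ((PySem.List.pyRange 0 N 1).map
      (fun i => (PySem.List.pyGetD weights i 0, PySem.List.pyGetD priority i 0)))
      (fun t => t.1) false with harr
    have := loop_eq limit arr arr.length 0 arr.length (by omega) (by omega) 0
    simpa [PySem.List.len_eq] using this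
  simp only [hboats, fold_eq, List.nil_append]
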